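-- pv_equiv track=rewrite | github.com/astrapi69/write-book-template | scripts/fix_german_quotes.py | is_in_frontmatter
-- ===== SOURCE A (Python) =====
-- def is_in_frontmatter(lines: list[str], line_idx: int) -> bool:
--     """Check whether a line falls inside YAML frontmatter (--- ... ---)."""
--     if not lines or not lines[0].rstrip() == "---":
--         return False
--     # Frontmatter starts at line 0, ends at the second ---
--     fence_count = 0
--     for i, line in enumerate(lines):
--         if line.rstrip() == "---":
--             fence_count += 1
--         if fence_count == 2:
--             return line_idx > 0 and line_idx <= i
--     # No closing --- found, everything after the first --- is frontmatter
--     return line_idx > 0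
-- ===== SOURCE B (Python) =====
-- def is_in_frontmatter(lines: list[str], line_idx: int) -> bool:
--     """Check whether a line falls inside YAML frontmatter (--- ... ---)."""
--     if not lines or lines[0].rstrip() != "---":
--         return False
--     if line_idx <= 0:
--         return False
--     # Inside frontmatter iff no fence line strictly between the opening fence
--     # and line_idx: the prefix lines[1:line_idx] must be fence-free.
--     return all(line.rstrip() != "---" for line in lines[1:line_idx])
-- ===== Notes on version B (the rewrite author's own statement) =====
-- stated objective: alternative
-- what changed: B never locates the closing fence: after the opening-fence guard it decides membership directly by checking that the prefix lines[1:line_idx] contains no fence line, instead of A's scan that counts fences until the second one and compares line_idx against its index.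
import Mathlib
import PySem

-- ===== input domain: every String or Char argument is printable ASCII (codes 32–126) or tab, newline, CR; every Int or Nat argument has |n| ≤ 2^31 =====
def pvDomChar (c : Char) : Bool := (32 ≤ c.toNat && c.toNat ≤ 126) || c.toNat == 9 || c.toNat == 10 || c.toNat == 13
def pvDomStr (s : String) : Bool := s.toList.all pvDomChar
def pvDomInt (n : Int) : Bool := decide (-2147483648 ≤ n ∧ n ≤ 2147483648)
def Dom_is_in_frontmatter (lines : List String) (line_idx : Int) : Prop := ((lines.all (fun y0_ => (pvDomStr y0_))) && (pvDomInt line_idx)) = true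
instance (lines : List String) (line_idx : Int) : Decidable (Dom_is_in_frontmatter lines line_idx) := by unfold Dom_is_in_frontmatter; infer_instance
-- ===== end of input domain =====

-- B replaces A's search for the second fence (counter with early exit) by a direct
-- membership test: line_idx is in frontmatter iff the prefix lines[1:line_idx] is
-- fence-free (objective: alternative).

-- ===== PORT A =====
-- the 'for i, line in enumerate(lines)' loop with the running fence_count
def pvALoop (rest : List (Int × String)) (fence_count : Int) (line_idx : Int) : Bool :=
  match rest with
  | [] => decide (line_idx > 0)          -- no closing --- found
  | (i, line) :: t =>
    let fc := if PySem.Str.rstrip line == "---" then fence_count + 1 else fence_count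
    if fc == 2 then decide (line_idx > 0 ∧ line_idx ≤ i)
    else pvALoop t fc line_idx

def is_in_frontmatter (lines : List String) (line_idx : Int) : Bool :=
  match lines with
  | [] => false
  | l0 :: _ =>
    if PySem.Str.rstrip l0 == "---" then
      pvALoop (PySem.List.enumerate lines) 0 line_idx
    else false

-- ===== PORT B =====
def is_in_frontmatter_alt (lines : List String) (line_idx : Int) : Bool :=
  match lines with
  | [] => false
  | l0 :: _ =>
    if PySem.Str.rstrip l0 == "---" then
      if line_idx ≤ 0 then false
      else
        -- all(line.rstrip() != "---" for line in lines[1:line_idx])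
        (PySem.List.slice lines (some 1) (some line_idx)).all
          (fun line => !(PySem.Str.rstrip line == "---"))
    else false

-- ===== PRECONDITION & SPEC =====
def Spec_is_in_frontmatter (lines : List String) (line_idx : Int) (out : Bool) : Prop := out = is_in_frontmatter_alt lines line_idx
instance (lines : List String) (line_idx : Int) (out : Bool) : Decidable (Spec_is_in_frontmatter lines line_idx out) := by unfold Spec_is_in_frontmatter; infer_instance

-- ===== CLAIM (what is proved, stated in full; the proofs are below) =====
def Claim_equal_is_in_frontmatter : Prop := ∀ (lines : List String) (line_idx : Int), Dom_is_in_frontmatter lines line_idx → Spec_is_in_frontmatter lines line_idx (is_in_frontmatter lines line_idx)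

-- ===== LEMMAS AND PROOFS =====

-- After the opening fence (fence_count = 1), A's loop over the lines enumerated from
-- offset s answers: line_idx > 0 and the first (line_idx - s) remaining lines are fence-free.
theorem pvALoop_one (t : List String) (s idx : Int) :
    pvALoop (PySem.List.enumerate t s) 1 idx =
      (decide (0 < idx) &&
        (t.take (idx - s).toNat).all (fun line => !(PySem.Str.rstrip line == "---"))) := by
  induction t generalizing s with
  | nil => simp [pvALoop, PySem.List.enumerate_nil]
  | cons line t' ih =>
    rw [PySem.List.enumerate_cons]
    by_cases h : PySem.Str.rstrip line = "---"
    · simp only [pvALoop, h, beq_self_eq_true, if_true]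
      rw [show ((1:Int) + 1) = 2 by ring]
      simp only [beq_self_eq_true, if_true]
      by_cases hs : idx ≤ s
      · have e : (idx - s).toNat = 0 := by omega
        simp only [e, List.take_zero, List.all_nil, Bool.and_true]
        by_cases h0 : 0 < idx
        · simp [h0, hs]
        · simp [h0]
      · have e : (idx - s).toNat = (idx - s - 1).toNat + 1 := by omega
        rw [e]
        simp [h, (show ¬ (idx > 0 ∧ idx ≤ s) by omega)]
    · have hb : (PySem.Str.rstrip line == "---") = false := by simp [h]
      simp only [pvALoop, hb, Bool.false_eq_true, if_false]
      rw [show ((1:Int) == 2) = false by decide]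
      simp only [Bool.false_eq_true, if_false]
      rw [ih (s+1)]
      by_cases hs : idx ≤ s
      · have e1 : (idx - s).toNat = 0 := by omega
        have e2 : (idx - (s+1)).toNat = 0 := by omega
        simp [e1, e2]
      · have e : (idx - s).toNat = (idx - (s+1)).toNat + 1 := by omega
        simp [e, hb]

-- ===== VERDICT (by name: the statement is the Claim_ definition above) =====
theorem is_in_frontmatter_spec : Claim_equal_is_in_frontmatter := by
  intro lines line_idx _
  unfold Spec_is_in_frontmatter is_in_frontmatter is_in_frontmatter_alt
  match lines with
  | [] => rfl
  | l0 :: t =>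
    by_cases h : PySem.Str.rstrip l0 = "---"
    · simp only [h, beq_self_eq_true, if_true]
      rw [PySem.List.enumerate_cons]
      simp only [pvALoop, h, beq_self_eq_true, if_true]
      rw [show ((0:Int) + 1) = 1 by ring,
          show ((1:Int) == 2) = false by decide]
      simp only [Bool.false_eq_true, if_false]
      rw [pvALoop_one t 1 line_idx]
      by_cases hp : line_idx ≤ 0
      · simp [hp, show ¬ (0 < line_idx) by omega]
      · have hnn : (0:Int) ≤ 1 := by omega
        rw [PySem.List.slice_toNat (l0 :: t) hnn (by omega : (0:Int) ≤ line_idx)]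
        have : ((1:Int).toNat) = 1 := rfl
        simp only [this, List.drop_one, List.tail_cons]
        have e : (line_idx - 1).toNat = line_idx.toNat - 1 := by omega
        simp [hp, e, show (0:Int) < line_idx by omega]
    · simp [h]
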